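-- pv_equiv track=rewrite | github.com/davidchocholaty/es-tools | es_tools/formal_models/erasing_system/custom_utils/regular_language_checking_tools.py | correctly_bracketed_without_nested_brackets
-- ===== SOURCE A (Python) =====
-- def correctly_bracketed_without_nested_brackets(regular_language: str) -> bool:
--     """Kontrola správnosti zápisu závorek v regulárním výrazu, přičemž nejsou povoleny jejich vnoření.
--
--     :param regular_language: regulární výraz pro regulární jazyk.
--     :type regular_language: str
--     :return: True, pokud regulární výraz obsahuje pouze správné uzávorkování a neobsahuje jejich vnoření, jinak False.
--     :rtype: bool
--     """
--     brackets = {"(": ")", "[": "]"}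
--
--     stack = []
--     for bracket in regular_language:
--         if bracket in brackets:  # opening bracket
--             if len(stack) > 0:
--                 stack.clear()
--                 return False
--
--             stack.append(bracket)
--         elif bracket in brackets.values():  # closing bracket
--             if (not stack) or (bracket != brackets[stack.pop()]):
--                 return False
--
--     return not stack
-- ===== SOURCE B (Python) =====
-- def correctly_bracketed_without_nested_brackets(regular_language: str) -> bool:
--     """Filter-then-pairwise check: keep only bracket characters, then verify they
--     form consecutive (opening, matching closing) pairs."""
--     pairs = {"(": ")", "[": "]"}
--     bs = [c for c in regular_language if c in "()[]"]
--     if len(bs) % 2 != 0: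
--         return False
--     return all(bs[i] in pairs and bs[i + 1] == pairs[bs[i]]
--                for i in range(0, len(bs), 2))
-- ===== Notes on version B (the rewrite author's own statement) =====
-- stated objective: alternative
-- what changed: Replaced the single-pass stack simulation by a filter-then-pairwise check: extract the bracket characters with a comprehension, reject odd length, and verify each consecutive pair is an opening bracket followed by its matching closer (C-speed filtering and all() instead of per-character stack bookkeeping).
import Mathlib
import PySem

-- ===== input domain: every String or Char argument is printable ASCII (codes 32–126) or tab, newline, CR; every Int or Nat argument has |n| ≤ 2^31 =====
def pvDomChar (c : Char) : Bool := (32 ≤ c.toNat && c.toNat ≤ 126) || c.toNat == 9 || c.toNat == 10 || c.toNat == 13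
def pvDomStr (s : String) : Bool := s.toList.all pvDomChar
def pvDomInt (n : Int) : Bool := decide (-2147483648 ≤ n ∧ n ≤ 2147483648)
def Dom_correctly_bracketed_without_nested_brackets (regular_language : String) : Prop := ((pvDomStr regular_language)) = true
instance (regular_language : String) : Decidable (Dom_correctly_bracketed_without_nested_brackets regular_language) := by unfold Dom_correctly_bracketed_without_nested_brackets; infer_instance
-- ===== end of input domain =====

-- B replaces A's single-pass stack by a filter-then-pairwise-verify decomposition (alternative, same cost).

-- ===== PORT A =====
-- brackets[x] for x an opening bracket ('(' -> ')', '[' -> ']')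
def pvBra (c : Char) : Char := if c = '(' then ')' else ']'

-- the for-loop of A: stack is a Python list, append/pop act at the back
def pvALoop : List Char → List Char → Bool
  | stack, [] => stack.isEmpty
  | stack, c :: rest =>
    if c = '(' ∨ c = '[' then          -- opening bracket
      if stack.length > 0 then false
      else pvALoop (stack ++ [c]) rest
    else if c = ')' ∨ c = ']' then     -- closing bracket
      match stack.getLast? with
      | none => false                   -- not stack
      | some x => if c ≠ pvBra x then false else pvALoop stack.dropLast rest
    else pvALoop stack rest

def correctly_bracketed_without_nested_brackets (regular_language : String) : Bool :=
  pvALoop [] regular_language.toList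

-- ===== PORT B =====
def pvIsBr (c : Char) : Bool := c = '(' || c = ')' || c = '[' || c = ']'

-- the `all` over consecutive pairs of the filtered list
def pvPairCheck : List Char → Bool
  | [] => true
  | [_] => false
  | a :: b :: r => ((a = '(' && b = ')') || (a = '[' && b = ']')) && pvPairCheck r

def correctly_bracketed_without_nested_brackets_alt (regular_language : String) : Bool :=
  let bs := regular_language.toList.filter pvIsBr
  if bs.length % 2 ≠ 0 then false
  else pvPairCheck bs

-- ===== PRECONDITION & SPEC =====
def Spec_correctly_bracketed_without_nested_brackets (regular_language : String) (out : Bool) : Prop := out = correctly_bracketed_without_nested_brackets_alt regular_language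
instance (regular_language : String) (out : Bool) : Decidable (Spec_correctly_bracketed_without_nested_brackets regular_language out) := by unfold Spec_correctly_bracketed_without_nested_brackets; infer_instance

-- ===== CLAIM (what is proved, stated in full; the proofs are below) =====
def Claim_equal_correctly_bracketed_without_nested_brackets : Prop := ∀ (regular_language : String), Dom_correctly_bracketed_without_nested_brackets regular_language → Spec_correctly_bracketed_without_nested_brackets regular_language (correctly_bracketed_without_nested_brackets regular_language)

-- ===== LEMMAS AND PROOFS =====

-- expected continuation of A's loop when the stack holds the single opening bracket x
def pvExpect (x : Char) : List Char → Bool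
  | [] => false
  | c :: r => (c = pvBra x) && pvPairCheck r

lemma pvALoop_filter (l : List Char) :
    pvALoop [] l = pvPairCheck (l.filter pvIsBr) ∧
    ∀ x, (x = '(' ∨ x = '[') → pvALoop [x] l = pvExpect x (l.filter pvIsBr) := by
  induction l with
  | nil => simp [pvALoop, pvExpect, pvPairCheck]
  | cons c rest ih =>
    obtain ⟨ih0, ih1⟩ := ih
    by_cases hop : c = '(' ∨ c = '['
    · have hbr : pvIsBr c = true := by rcases hop with h | h <;> simp [pvIsBr, h]
      constructor
      · rw [show pvALoop [] (c :: rest) = pvALoop [c] rest by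
          simp [pvALoop, hop]]
        rw [ih1 c hop]
        simp only [List.filter_cons, hbr, if_pos]
        cases hf : rest.filter pvIsBr with
        | nil => simp [pvExpect, pvPairCheck]
        | cons b r =>
          have hbop : pvBra c ≠ '(' ∧ pvBra c ≠ '[' := by
            rcases hop with h | h <;> simp [pvBra, h]
          rcases hop with h | h <;>
            simp [pvExpect, pvPairCheck, h, pvBra]
      · intro x hx
        have : pvALoop [x] (c :: rest) = false := by
          simp [pvALoop, hop]
        rw [this]
        simp only [List.filter_cons, hbr, if_pos]
        have : c ≠ pvBra x := by
          rcases hx with h | h <;> rcases hop with h' | h' <;> simp [pvBra, h, h']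
        simp [pvExpect, this]
    · by_cases hcl : c = ')' ∨ c = ']'
      · have hbr : pvIsBr c = true := by rcases hcl with h | h <;> simp [pvIsBr, h]
        constructor
        · have : pvALoop [] (c :: rest) = false := by
            simp [pvALoop, hop, hcl]
          rw [this]
          simp only [List.filter_cons, hbr, if_pos]
          cases hf : rest.filter pvIsBr with
          | nil => simp [pvPairCheck]
          | cons b r =>
            rcases hcl with h | h <;> simp [pvPairCheck, h]
        · intro x hx
          simp only [List.filter_cons, hbr, if_pos]
          by_cases hm : c = pvBra x
          · have : pvALoop [x] (c :: rest) = pvALoop [] rest := by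
              rcases hx with h | h <;> simp [pvALoop, hm, h, pvBra]
            rw [this, ih0]
            simp [pvExpect, hm]
          · have : pvALoop [x] (c :: rest) = false := by
              simp [pvALoop, hop, hcl, hm]
            rw [this]
            simp [pvExpect, hm]
      · have hbr : pvIsBr c = false := by
          simp only [pvIsBr]
          rcases Decidable.em (c = '(') with h | h
          · exact absurd (Or.inl h) hop
          · rcases Decidable.em (c = '[') with h' | h'
            · exact absurd (Or.inr h') hop
            · rcases Decidable.em (c = ')') with h2 | h2
              · exact absurd (Or.inl h2) hcl
              · rcases Decidable.em (c = ']') with h3 | h3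
                · exact absurd (Or.inr h3) hcl
                · simp [h, h', h2, h3]
        constructor
        · have : pvALoop [] (c :: rest) = pvALoop [] rest := by
            simp [pvALoop, hop, hcl]
          rw [this, ih0]
          simp [hbr]
        · intro x hx
          have : pvALoop [x] (c :: rest) = pvALoop [x] rest := by
            simp [pvALoop, hop, hcl]
          rw [this, ih1 x hx]
          simp [hbr]

lemma pvPairCheck_odd (l : List Char) (h : l.length % 2 ≠ 0) : pvPairCheck l = false := by
  induction l using pvPairCheck.induct with
  | case1 => simp at h
  | case2 => simp [pvPairCheck]
  | case3 a b r ih =>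
    simp only [pvPairCheck]
    by_cases hr : r.length % 2 = 0
    · exfalso; apply h; simp [List.length_cons]; omega
    · simp [ih hr]

-- ===== VERDICT (by name: the statement is the Claim_ definition above) =====
theorem correctly_bracketed_without_nested_brackets_spec : Claim_equal_correctly_bracketed_without_nested_brackets := by
  intro s _
  unfold Spec_correctly_bracketed_without_nested_brackets
  unfold correctly_bracketed_without_nested_brackets correctly_bracketed_without_nested_brackets_alt
  rw [(pvALoop_filter s.toList).1]
  by_cases h : (s.toList.filter pvIsBr).length % 2 = 0
  · simp [h]
  · simp [h, pvPairCheck_odd _ h]
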